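-- pv_equiv track=rewrite | github.com/NotTete/Damas-NOSQL | game.py | decodeBoard
-- ===== SOURCE A (Python) =====
-- def getXY(i):
--     i *= 2
--     y = i // 8
--     x = i % 8 + (y % 2 == 1)
--
--     return x, y
--
-- def decodeBoard(p1n, p2n, p1q, p2q):
--     board = [[0 for j in range(8)] for i in range(8)]
--
--     for i in range(32):
--         x, y = getXY(i)
--         if p1n & (1 << i): board[y][x] = 1
--         elif p2n & (1 << i): board[y][x] = -1
--         elif p1q & (1 << i): board[y][x] = 2
--         elif p2q & (1 << i): board[y][x] = -2
--
--     return board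
-- ===== SOURCE B (Python) =====
-- def decodeBoard(p1n, p2n, p1q, p2q):
--     # Build the board directly, one closed-form lookup per cell: a cell (y, x) is a
--     # playable square iff x and y have the same parity, and then corresponds to bit
--     # i = 4*y + (x - y % 2) // 2; the mask tests keep the original priority order.
--     def cell(y, x):
--         if x % 2 != y % 2:
--             return 0
--         b = 1 << (4 * y + (x - y % 2) // 2)
--         if p1n & b:
--             return 1
--         if p2n & b:
--             return -1
--         if p1q & b:
--             return 2
--         if p2q & b:
--             return -2
--         return 0
--
--     return [[cell(y, x) for x in range(8)] for y in range(8)]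
-- ===== Notes on version B (the rewrite author's own statement) =====
-- stated objective: alternative
-- what changed: Replaces A's zero-initialized board mutated by a 32-step loop with elif writes by a pure per-cell construction: each of the 64 cells is computed directly from a closed-form bit index (playable iff x,y have equal parity, bit 4*y+(x-y%2)//2), no mutation and no getXY loop.
import Mathlib
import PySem

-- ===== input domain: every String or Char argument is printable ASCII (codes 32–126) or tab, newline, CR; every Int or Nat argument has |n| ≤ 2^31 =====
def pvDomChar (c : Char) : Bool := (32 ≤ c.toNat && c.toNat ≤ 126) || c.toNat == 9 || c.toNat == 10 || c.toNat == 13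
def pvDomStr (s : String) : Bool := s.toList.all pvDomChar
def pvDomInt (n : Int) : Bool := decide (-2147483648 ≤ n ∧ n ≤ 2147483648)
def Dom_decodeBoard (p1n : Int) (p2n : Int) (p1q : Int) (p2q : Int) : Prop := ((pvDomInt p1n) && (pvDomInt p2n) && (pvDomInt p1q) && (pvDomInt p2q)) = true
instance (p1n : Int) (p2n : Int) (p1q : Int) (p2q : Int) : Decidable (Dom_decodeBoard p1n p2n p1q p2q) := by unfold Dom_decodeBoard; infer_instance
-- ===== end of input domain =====

-- B replaces A's 32-step mutating loop (elif chain writing through getXY) by a pure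
-- per-cell construction with a closed-form bit index; objective: alternative decomposition.

-- ===== PORT A =====
def getXY (i : Int) : Int × Int :=
  let i2 := i * 2
  let y := PySem.Int.floordiv i2 8
  let x := PySem.Int.mod i2 8 + (if PySem.Int.mod y 2 = 1 then 1 else 0)
  (x, y)

-- board[y][x] = v; in decodeBoard both indices are always in 0..7, where set/getD/toNat are exact
def setCell (b : List (List Int)) (y : Int) (x : Int) (v : Int) : List (List Int) :=
  b.set y.toNat ((b.getD y.toNat []).set x.toNat v)

-- one iteration of A's `for i in range(32)` body (`if mask & (1 << i):` is a nonzero test)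
def stepA (p1n : Int) (p2n : Int) (p1q : Int) (p2q : Int) (b : List (List Int)) (i : Int) : List (List Int) :=
  let xy := getXY i
  let x := xy.1
  let y := xy.2
  if PySem.Int.band p1n ((1:Int) <<< i.toNat) ≠ 0 then setCell b y x 1
  else if PySem.Int.band p2n ((1:Int) <<< i.toNat) ≠ 0 then setCell b y x (-1)
  else if PySem.Int.band p1q ((1:Int) <<< i.toNat) ≠ 0 then setCell b y x 2
  else if PySem.Int.band p2q ((1:Int) <<< i.toNat) ≠ 0 then setCell b y x (-2)
  else b

def decodeBoard (p1n : Int) (p2n : Int) (p1q : Int) (p2q : Int) : List (List Int) :=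
  let board := (List.range 8).map (fun _ => (List.range 8).map (fun _ => (0:Int)))
  (PySem.List.pyRange 0 32 1).foldl (stepA p1n p2n p1q p2q) board

-- ===== PORT B =====
def cellB (p1n : Int) (p2n : Int) (p1q : Int) (p2q : Int) (y : Int) (x : Int) : Int :=
  if PySem.Int.mod x 2 ≠ PySem.Int.mod y 2 then 0
  else
    -- 1 << (4*y + (x - y%2)//2); the shift amount is a nonnegative int here, where toNat is exact
    let b := (1:Int) <<< (4 * y + PySem.Int.floordiv (x - PySem.Int.mod y 2) 2).toNat
    if PySem.Int.band p1n b ≠ 0 then 1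
    else if PySem.Int.band p2n b ≠ 0 then -1
    else if PySem.Int.band p1q b ≠ 0 then 2
    else if PySem.Int.band p2q b ≠ 0 then -2
    else 0

def decodeBoard_alt (p1n : Int) (p2n : Int) (p1q : Int) (p2q : Int) : List (List Int) :=
  (PySem.List.pyRange 0 8 1).map (fun y =>
    (PySem.List.pyRange 0 8 1).map (fun x => cellB p1n p2n p1q p2q y x))

-- ===== PRECONDITION & SPEC =====
def Spec_decodeBoard (p1n : Int) (p2n : Int) (p1q : Int) (p2q : Int) (out : List (List Int)) : Prop := out = decodeBoard_alt p1n p2n p1q p2q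
instance (p1n : Int) (p2n : Int) (p1q : Int) (p2q : Int) (out : List (List Int)) : Decidable (Spec_decodeBoard p1n p2n p1q p2q out) := by unfold Spec_decodeBoard; infer_instance

-- ===== CLAIM (what is proved, stated in full; the proofs are below) =====
def Claim_equal_decodeBoard : Prop := ∀ (p1n : Int) (p2n : Int) (p1q : Int) (p2q : Int), Dom_decodeBoard p1n p2n p1q p2q → Spec_decodeBoard p1n p2n p1q p2q (decodeBoard p1n p2n p1q p2q)

-- ===== LEMMAS AND PROOFS =====

-- cell reader (board[y][x], default 0) and the board-shape invariant
def gCell (b : List (List Int)) (y : Nat) (x : Nat) : Int := (b.getD y []).getD x 0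

def Shape (b : List (List Int)) : Prop := b.length = 8 ∧ ∀ r ∈ b, r.length = 8

-- the elif chain of A as a function of the mask bit and the old cell value
def chain (p1n p2n p1q p2q m old : Int) : Int :=
  if PySem.Int.band p1n m ≠ 0 then 1
  else if PySem.Int.band p2n m ≠ 0 then -1
  else if PySem.Int.band p1q m ≠ 0 then 2
  else if PySem.Int.band p2q m ≠ 0 then -2
  else old

-- the bit index owning cell (y, x)
def iOf (y x : Nat) : Nat := 4 * y + (x - y % 2) / 2

lemma getXY_fst (i : Int) : (getXY i).1 =
    PySem.Int.mod (i * 2) 8 + (if PySem.Int.mod (PySem.Int.floordiv (i * 2) 8) 2 = 1 then 1 else 0) := rfl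

lemma getXY_snd (i : Int) : (getXY i).2 = PySem.Int.floordiv (i * 2) 8 := rfl

lemma getXY_bounds (i : Int) (h0 : 0 ≤ i) (h32 : i < 32) :
    0 ≤ (getXY i).1 ∧ (getXY i).1 < 8 ∧ 0 ≤ (getXY i).2 ∧ (getXY i).2 < 8 := by
  rw [getXY_fst, getXY_snd]
  simp only [PySem.Int.floordiv_eq_ediv_of_pos (show (0:Int) < 8 by norm_num),
    PySem.Int.mod_eq_emod_of_pos (show (0:Int) < 8 by norm_num),
    PySem.Int.mod_eq_emod_of_pos (show (0:Int) < 2 by norm_num)]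
  split_ifs with h <;> constructor <;> omega

lemma getXY_eq_iff (i : Int) (h0 : 0 ≤ i) (h32 : i < 32) (y x : Nat) (hy : y < 8) (hx : x < 8) :
    ((getXY i).2 = (y : Int) ∧ (getXY i).1 = (x : Int)) ↔ (x % 2 = y % 2 ∧ i = (iOf y x : Int)) := by
  rw [getXY_fst, getXY_snd]
  unfold iOf
  simp only [PySem.Int.floordiv_eq_ediv_of_pos (show (0:Int) < 8 by norm_num),
    PySem.Int.mod_eq_emod_of_pos (show (0:Int) < 8 by norm_num),
    PySem.Int.mod_eq_emod_of_pos (show (0:Int) < 2 by norm_num)]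
  interval_cases y <;> interval_cases x <;> split_ifs <;>
    (constructor <;> rintro ⟨h1, h2⟩ <;>
      first
        | exact h1.elim
        | exact h2.elim
        | trivial
        | omega)

lemma shape_setCell (b : List (List Int)) (y x v : Int) (hb : Shape b)
    (hy : 0 ≤ y ∧ y < 8) : Shape (setCell b y x v) := by
  obtain ⟨hl, hr⟩ := hb
  constructor
  · simp [setCell, hl]
  · intro r hrmem
    rcases List.mem_or_eq_of_mem_set hrmem with h | h
    · exact hr r h
    · subst h
      rw [List.length_set]
      apply hr
      have hyb : y.toNat < b.length := by omega
      rw [List.getD_eq_getElem _ _ hyb]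
      exact List.getElem_mem hyb

lemma gCell_setCell (b : List (List Int)) (yI xI : Int) (v : Int) (hb : Shape b)
    (hyI : 0 ≤ yI ∧ yI < 8) (hxI : 0 ≤ xI ∧ xI < 8) (y x : Nat) (hy : y < 8) (hx : x < 8) :
    gCell (setCell b yI xI v) y x = if yI = (y : Int) ∧ xI = (x : Int) then v else gCell b y x := by
  obtain ⟨hl, hr⟩ := hb
  have hyb : yI.toNat < b.length := by omega
  have hrow : (b.getD yI.toNat []).length = 8 := by
    rw [List.getD_eq_getElem _ _ hyb]
    exact hr _ (List.getElem_mem hyb)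
  unfold gCell setCell
  by_cases hyy : yI.toNat = y
  · subst hyy
    rw [List.getD_eq_getElem _ _ (show yI.toNat < (b.set yI.toNat ((b.getD yI.toNat []).set xI.toNat v)).length by rw [List.length_set]; omega),
      List.getElem_set_self (by rw [List.length_set]; omega)]
    by_cases hxx : xI.toNat = x
    · subst hxx
      rw [if_pos ⟨by omega, by omega⟩,
        List.getD_eq_getElem _ _ (show xI.toNat < ((b.getD yI.toNat []).set xI.toNat v).length by rw [List.length_set]; omega),
        List.getElem_set_self (by rw [List.length_set]; omega)]
    · rw [if_neg (by omega),
        List.getD_eq_getElem _ _ (show x < ((b.getD yI.toNat []).set xI.toNat v).length by rw [List.length_set]; omega),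
        List.getElem_set_ne hxx,
        ← List.getD_eq_getElem (b.getD yI.toNat []) 0 (show x < (b.getD yI.toNat []).length by omega)]
  · rw [if_neg (by omega),
      List.getD_eq_getElem _ _ (show y < (b.set yI.toNat ((b.getD yI.toNat []).set xI.toNat v)).length by rw [List.length_set]; omega),
      List.getElem_set_ne hyy,
      ← List.getD_eq_getElem b [] (show y < b.length by omega)]

lemma shape_stepA (p1n p2n p1q p2q : Int) (b : List (List Int)) (i : Int)
    (h0 : 0 ≤ i) (h32 : i < 32) (hb : Shape b) : Shape (stepA p1n p2n p1q p2q b i) := by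
  have hbd := getXY_bounds i h0 h32
  unfold stepA
  split_ifs <;>
    first
      | exact hb
      | exact shape_setCell _ _ _ _ hb ⟨hbd.2.2.1, hbd.2.2.2⟩

lemma gCell_stepA (p1n p2n p1q p2q : Int) (b : List (List Int)) (i : Int)
    (h0 : 0 ≤ i) (h32 : i < 32) (hb : Shape b) (y x : Nat) (hy : y < 8) (hx : x < 8) :
    gCell (stepA p1n p2n p1q p2q b i) y x =
      if x % 2 = y % 2 ∧ i = (iOf y x : Int) then
        chain p1n p2n p1q p2q ((1:Int) <<< i.toNat) (gCell b y x)
      else gCell b y x := by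
  have hbd := getXY_bounds i h0 h32
  have hiff := getXY_eq_iff i h0 h32 y x hy hx
  have hset : ∀ v : Int, gCell (setCell b (getXY i).2 (getXY i).1 v) y x =
      if (getXY i).2 = (y : Int) ∧ (getXY i).1 = (x : Int) then v else gCell b y x :=
    fun v => gCell_setCell b _ _ v hb ⟨hbd.2.2.1, hbd.2.2.2⟩ ⟨hbd.1, hbd.2.1⟩ y x hy hx
  by_cases hc : x % 2 = y % 2 ∧ i = (iOf y x : Int)
  · rw [if_pos hc]
    have hxy := hiff.mpr hc
    unfold stepA chain
    split_ifs with c1 c2 c3 c4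
    · rw [hset 1, if_pos hxy]
    · rw [hset (-1), if_pos hxy]
    · rw [hset 2, if_pos hxy]
    · rw [hset (-2), if_pos hxy]
    · rfl
  · rw [if_neg hc]
    have hxy : ¬ ((getXY i).2 = (y : Int) ∧ (getXY i).1 = (x : Int)) := fun hh => hc (hiff.mp hh)
    unfold stepA
    split_ifs with c1 c2 c3 c4
    · rw [hset 1, if_neg hxy]
    · rw [hset (-1), if_neg hxy]
    · rw [hset 2, if_neg hxy]
    · rw [hset (-2), if_neg hxy]
    · rfl

lemma shape_foldl (p1n p2n p1q p2q : Int) (l : List Int) (b : List (List Int))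
    (hl : ∀ i ∈ l, 0 ≤ i ∧ i < 32) (hb : Shape b) :
    Shape (l.foldl (stepA p1n p2n p1q p2q) b) := by
  induction l generalizing b with
  | nil => exact hb
  | cons i t ih =>
      have hi := hl i List.mem_cons_self
      exact ih _ (fun j hj => hl j (List.mem_cons_of_mem i hj))
        (shape_stepA _ _ _ _ b i hi.1 hi.2 hb)

lemma gCell_foldl (p1n p2n p1q p2q : Int) (l : List Int) (b : List (List Int))
    (hl : ∀ i ∈ l, 0 ≤ i ∧ i < 32) (hnd : l.Nodup) (hb : Shape b)
    (y x : Nat) (hy : y < 8) (hx : x < 8) :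
    gCell (l.foldl (stepA p1n p2n p1q p2q) b) y x =
      if x % 2 = y % 2 ∧ ((iOf y x : Int) ∈ l) then
        chain p1n p2n p1q p2q ((1:Int) <<< iOf y x) (gCell b y x)
      else gCell b y x := by
  induction l generalizing b with
  | nil => simp
  | cons i t ih =>
      have hi := hl i List.mem_cons_self
      have hstep := gCell_stepA p1n p2n p1q p2q b i hi.1 hi.2 hb y x hy hx
      have hshape := shape_stepA p1n p2n p1q p2q b i hi.1 hi.2 hb
      rw [List.foldl_cons,
          ih _ (fun j hj => hl j (List.mem_cons_of_mem i hj)) (List.Nodup.of_cons hnd) hshape]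
      by_cases hp : x % 2 = y % 2
      · by_cases hmem : (iOf y x : Int) ∈ t
        · have hne : i ≠ (iOf y x : Int) := by
            intro h
            rw [h] at hnd
            exact (List.nodup_cons.mp hnd).1 hmem
          rw [hstep]
          simp [hp, hmem, hne, List.mem_cons]
        · by_cases hieq : i = (iOf y x : Int)
          · rw [hstep]
            simp [hp, hmem, hieq]
          · have hieq' : ¬((iOf y x : Int) = i) := fun hh => hieq hh.symm
            rw [hstep]
            simp [hp, hmem, hieq, hieq', List.mem_cons]
      · simp only [hp, false_and, if_false] at hstep ⊢
        rw [hstep]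

lemma getD_replicate_zero (n x : Nat) : (List.replicate n (0:Int)).getD x 0 = 0 := by
  by_cases h : x < n
  · rw [List.getD_eq_getElem _ _ (by simpa using h)]
    exact List.getElem_replicate _
  · exact List.getD_eq_default _ _ (by simpa using h)

lemma gCell_board0 (y x : Nat) :
    gCell ((List.range 8).map (fun _ => (List.range 8).map (fun _ => (0:Int)))) y x = 0 := by
  have h : ((List.range 8).map (fun _ => (List.range 8).map (fun _ => (0:Int)))) =
      List.replicate 8 (List.replicate 8 (0:Int)) := by decide
  unfold gCell
  rw [h]
  by_cases hy : y < 8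
  · have h1 : (List.replicate 8 (List.replicate 8 (0:Int))).getD y [] = List.replicate 8 (0:Int) := by
      rw [List.getD_eq_getElem _ _ (by simpa using hy)]
      exact List.getElem_replicate _
    rw [h1, getD_replicate_zero]
  · have h1 : (List.replicate 8 (List.replicate 8 (0:Int))).getD y [] = [] := by
      exact List.getD_eq_default _ _ (by simpa using hy)
    rw [h1]
    rfl

-- B's cell at cast coordinates equals the elif chain at bit iOf (or 0 off-parity)
lemma cellB_eq (p1n p2n p1q p2q : Int) (y x : Nat) (hy : y < 8) (hx : x < 8) :
    cellB p1n p2n p1q p2q (y : Int) (x : Int) =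
      if x % 2 = y % 2 then chain p1n p2n p1q p2q ((1:Int) <<< iOf y x) 0 else 0 := by
  have hmx : PySem.Int.mod (x:Int) 2 = (x:Int) % 2 := PySem.Int.mod_eq_emod_of_pos (by norm_num)
  have hmy : PySem.Int.mod (y:Int) 2 = (y:Int) % 2 := PySem.Int.mod_eq_emod_of_pos (by norm_num)
  unfold cellB chain iOf
  rw [hmx, hmy, PySem.Int.floordiv_eq_ediv_of_pos (show (0:Int) < 2 by norm_num)]
  by_cases hp : x % 2 = y % 2
  · rw [if_neg (show ¬((x:Int) % 2 ≠ (y:Int) % 2) by omega), if_pos hp,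
      show ((4 * (y:Int) + ((x:Int) - (y:Int) % 2) / 2)).toNat = 4 * y + (x - y % 2) / 2 by omega]
  · rw [if_pos (show ((x:Int) % 2 ≠ (y:Int) % 2) by omega), if_neg hp]

lemma decodeBoard_def (p1n p2n p1q p2q : Int) : decodeBoard p1n p2n p1q p2q =
    (PySem.List.pyRange 0 32 1).foldl (stepA p1n p2n p1q p2q)
      ((List.range 8).map (fun _ => (List.range 8).map (fun _ => (0:Int)))) := rfl

lemma main_eq (p1n p2n p1q p2q : Int) :
    decodeBoard p1n p2n p1q p2q = decodeBoard_alt p1n p2n p1q p2q := by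
  have hrange : ∀ i ∈ PySem.List.pyRange 0 32 1, 0 ≤ i ∧ i < 32 := by decide
  have hnd : (PySem.List.pyRange 0 32 1).Nodup := by decide
  have hb0 : Shape ((List.range 8).map (fun _ => (List.range 8).map (fun _ => (0:Int)))) := by
    unfold Shape
    constructor <;> decide
  have hshape : Shape (decodeBoard p1n p2n p1q p2q) := by
    rw [decodeBoard_def]
    exact shape_foldl p1n p2n p1q p2q _ _ hrange hb0
  have hcell : ∀ y x : Nat, y < 8 → x < 8 →
      gCell (decodeBoard p1n p2n p1q p2q) y x = cellB p1n p2n p1q p2q (y : Int) (x : Int) := by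
    intro y x hy hx
    rw [decodeBoard_def,
      gCell_foldl p1n p2n p1q p2q _ _ hrange hnd hb0 y x hy hx,
      cellB_eq p1n p2n p1q p2q y x hy hx, gCell_board0]
    have hmem : ((iOf y x : Nat) : Int) ∈ PySem.List.pyRange 0 32 1 := by
      rw [PySem.List.mem_pyRange_one]
      unfold iOf
      constructor <;> omega
    simp [hmem]
  have hpylen : (PySem.List.pyRange 0 8 1).length = 8 := rfl
  have hpyget : ∀ (n : Nat) (h : n < 8),
      (PySem.List.pyRange 0 8 1)[n]'(by rw [hpylen]; exact h) = (n : Int) := by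
    intro n h
    interval_cases n <;> rfl
  have haltlen : (decodeBoard_alt p1n p2n p1q p2q).length = 8 := by
    unfold decodeBoard_alt
    rw [List.length_map, hpylen]
  apply List.ext_getElem
  · rw [hshape.1, haltlen]
  · intro n h1 h2
    have hn8 : n < 8 := by rw [haltlen] at h2; exact h2
    have hrowlen : (decodeBoard p1n p2n p1q p2q)[n].length = 8 :=
      hshape.2 _ (List.getElem_mem h1)
    have haltrow : (decodeBoard_alt p1n p2n p1q p2q)[n]'h2 =
        (PySem.List.pyRange 0 8 1).map (fun x => cellB p1n p2n p1q p2q (n : Int) x) := by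
      unfold decodeBoard_alt
      rw [List.getElem_map, hpyget n hn8]
    apply List.ext_getElem
    · rw [hrowlen, haltrow, List.length_map, hpylen]
    · intro m hm1 hm2
      have hm8 : m < 8 := by rw [hrowlen] at hm1; exact hm1
      have hrhs : ((decodeBoard_alt p1n p2n p1q p2q)[n]'h2)[m]'hm2 =
          cellB p1n p2n p1q p2q (n : Int) (m : Int) := by
        rw [List.getElem_of_eq haltrow hm2, List.getElem_map, hpyget m hm8]
      rw [hrhs]
      have hc := hcell n m hn8 hm8
      unfold gCell at hc
      rw [List.getD_eq_getElem _ _ h1, List.getD_eq_getElem _ _ (by rw [hrowlen]; exact hm8)] at hc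
      exact hc

-- ===== VERDICT (by name: the statement is the Claim_ definition above) =====
theorem decodeBoard_spec : Claim_equal_decodeBoard := by
  intro p1n p2n p1q p2q _
  unfold Spec_decodeBoard
  exact main_eq p1n p2n p1q p2q
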